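-- pv_equiv track=rewrite | github.com/mijanto/wacutils | testing.py | operationNumber
-- ===== SOURCE A (Python) =====
-- def binary(n):
-- 	return bin(n)[2:]
--
-- def operationBit(a,b,rule):
-- 	newRule = binary(rule)
-- 	if len(binary(rule)) < 4:
-- 		newRule = ('0'*(4-len(binary(rule)))) + binary(rule)
-- 	return int(newRule[2*a+b])
--
-- def operationNumber(a,b,rule):
-- 	ba = binary(a)
-- 	bb = binary(b)
--
-- 	# Make len(aa) = len(bb) without changing the binary value of it. (For iterating through it later)
-- 	if len(ba) > len(bb):
-- 		bb = ('0'*(len(ba)-len(bb))) + bb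
-- 	elif len(ba) < len(bb):
-- 		ba = ('0'*(len(bb)-len(ba))) + ba
--
-- 	out=0
-- 	# Run bit operation on every bit in the numbers
-- 	for i in range(len(ba)):
-- 		b1 = int(ba[i])
-- 		b2 = int(bb[i])
-- 		out += (2**i)*operationBit(b1, b2, rule)
--
-- 	return out
-- ===== SOURCE B (Python) =====
-- def operationNumber(a, b, rule):
--     # Combine the whole numbers with four bitwise mask operations (one per
--     # truth-table entry), then bit-reverse the n-bit result, instead of
--     # looking up the rule per bit.
--     n = max(a.bit_length(), b.bit_length(), 1)
--     L = max(4, rule.bit_length())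
--     t = [(rule >> (L - 1 - k)) & 1 for k in range(4)]
--     full = (1 << n) - 1
--     na = a ^ full
--     nb = b ^ full
--     v = 0
--     if t[3]:
--         v |= a & b
--     if t[2]:
--         v |= a & nb
--     if t[1]:
--         v |= na & b
--     if t[0]:
--         v |= na & nb
--     # A weights the i-th most-significant bit by 2**i, i.e. reverses the bits.
--     r = 0
--     for _ in range(n):
--         r = r * 2 + (v & 1)
--         v >>= 1
--     return r
-- ===== Notes on version B (the rewrite author's own statement) =====
-- stated objective: alternative
-- what changed: B replaces A's per-bit loop with rule-table lookup by whole-number bitwise algebra: it builds the result in one shot from four masks (a&b, a&~b, ~a&b, ~a&~b selected by the rule's four table bits) and then bit-reverses the n-bit value to reproduce A's 2**i weighting of the i-th most-significant bit.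
-- outside the precondition, e.g. on operationNumber(1, 3, -1): A returns 2, B returns 3
import Mathlib
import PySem

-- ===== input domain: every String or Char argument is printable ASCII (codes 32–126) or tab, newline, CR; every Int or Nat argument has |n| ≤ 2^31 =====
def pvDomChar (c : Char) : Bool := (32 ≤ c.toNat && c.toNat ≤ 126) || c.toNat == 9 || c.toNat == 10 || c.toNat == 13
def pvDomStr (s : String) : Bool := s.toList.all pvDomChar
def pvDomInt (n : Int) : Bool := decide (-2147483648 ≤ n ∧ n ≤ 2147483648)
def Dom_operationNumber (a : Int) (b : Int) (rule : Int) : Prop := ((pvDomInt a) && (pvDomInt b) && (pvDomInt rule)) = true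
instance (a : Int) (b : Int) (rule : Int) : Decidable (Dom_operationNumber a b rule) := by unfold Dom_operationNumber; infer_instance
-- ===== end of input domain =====

-- B drops A's per-bit rule lookup: it combines the whole numbers with four bitwise
-- masks selected by the rule's table bits and then bit-reverses the n-bit result;
-- objective: alternative (whole-number bitwise algebra instead of a per-bit table loop).

-- ===== PORT A =====
-- bin(m) digits for m : Nat (MSB first); bin(0)[2:] = "0" is handled in pvBinary
def pvBinChars (m : Nat) : List Char :=
  if m = 0 then [] else pvBinChars (m / 2) ++ [if m % 2 = 1 then '1' else '0']
decreasing_by exact Nat.div_lt_self (Nat.pos_of_ne_zero (by assumption)) (by norm_num)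

-- binary(n) = bin(n)[2:]; exact for n ≥ 0 (Pre_ excludes negatives, where Python A raises)
def pvBinary (n : Int) : List Char :=
  if n.toNat = 0 then ['0'] else pvBinChars n.toNat

-- int(ch) for the digit characters '0'/'1' that occur here
def pvCharInt (c : Char) : Int := if c = '1' then 1 else 0

def operationBit (a : Int) (b : Int) (rule : Int) : Int :=
  let newRule :=
    if (pvBinary rule).length < 4 then
      List.replicate (4 - (pvBinary rule).length) '0' ++ pvBinary rule
    else pvBinary rule
  -- newRule[2*a+b]; the index is in range (0..3) on Pre_, getD is only totalisation
  pvCharInt (newRule.getD (2 * a + b).toNat '0')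

def operationNumber (a : Int) (b : Int) (rule : Int) : Int :=
  let ba0 := pvBinary a
  let bb0 := pvBinary b
  let ba := if ba0.length > bb0.length then ba0
            else if ba0.length < bb0.length then List.replicate (bb0.length - ba0.length) '0' ++ ba0
            else ba0
  let bb := if ba0.length > bb0.length then List.replicate (ba0.length - bb0.length) '0' ++ bb0
            else bb0
  (List.range ba.length).foldl (fun out i =>
    out + (2 ^ i : Int) * operationBit (pvCharInt (ba.getD i '0')) (pvCharInt (bb.getD i '0')) rule) 0

-- ===== PORT B =====
-- int.bit_length()
def pvBitLen (m : Nat) : Nat :=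
  if m = 0 then 0 else pvBitLen (m / 2) + 1
decreasing_by exact Nat.div_lt_self (Nat.pos_of_ne_zero (by assumption)) (by norm_num)

-- 'if cond: v |= mask' (cond a 0/1 rule-table bit)
def pvMaskStep (cond : Nat) (v : Nat) (m : Nat) : Nat := if cond ≠ 0 then v ||| m else v

-- Source B; bit operations done on toNat, exact for the nonnegative inputs admitted by Pre_
def operationNumber_alt (a : Int) (b : Int) (rule : Int) : Int :=
  let x := a.toNat
  let y := b.toNat
  let n := max (max (pvBitLen x) (pvBitLen y)) 1
  let L := max 4 (pvBitLen rule.toNat)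
  let t := (List.range 4).map (fun k => rule.toNat >>> (L - 1 - k) % 2)
  let full := 1 <<< n - 1
  let na := x ^^^ full
  let nb := y ^^^ full
  let v := pvMaskStep (t.getD 0 0)
             (pvMaskStep (t.getD 1 0)
               (pvMaskStep (t.getD 2 0)
                 (pvMaskStep (t.getD 3 0) 0 (x &&& y))
                 (x &&& nb))
               (na &&& y))
             (na &&& nb)
  -- 'for _ in range(n): r = r * 2 + (v & 1); v >>= 1'
  (((List.range n).foldl (fun p _ => (p.1 * 2 + (p.2 &&& 1), p.2 >>> 1)) ((0 : Nat), v)).1 : Int)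

-- ===== PRECONDITION & SPEC =====
-- Pre_ excludes negative arguments: for negative a or b A always raises ValueError (int() hits the 'b' of bin()'s
-- '-0b…' text); for negative rule A either raises or returns a value read off that '-0b…' text, an accident of the
-- string encoding that no caller would specify, while B does the natural arithmetic thing there.
def Pre_operationNumber (a : Int) (b : Int) (rule : Int) : Prop := 0 ≤ a ∧ 0 ≤ b ∧ 0 ≤ rule
instance (a : Int) (b : Int) (rule : Int) : Decidable (Pre_operationNumber a b rule) := by
  unfold Pre_operationNumber; infer_instance
def pvWitness_operationNumber : Int × Int × Int := (6, 3, 7)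

def Spec_operationNumber (a : Int) (b : Int) (rule : Int) (out : Int) : Prop := out = operationNumber_alt a b rule
instance (a : Int) (b : Int) (rule : Int) (out : Int) : Decidable (Spec_operationNumber a b rule out) := by unfold Spec_operationNumber; infer_instance

-- ===== CLAIM (what is proved, stated in full; the proofs are below) =====
def Claim_equal_operationNumber : Prop := ∀ (a : Int) (b : Int) (rule : Int), Dom_operationNumber a b rule → Pre_operationNumber a b rule → Spec_operationNumber a b rule (operationNumber a b rule)

-- ===== LEMMAS AND PROOFS =====

-- the 0/1 truth-table bit A reads off the (padded) binary string of the rule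
def pvTb (rule : Int) (x y : Nat) : Nat :=
  rule.toNat >>> (max 4 (pvBitLen rule.toNat) - 1 - (2 * x + y)) % 2

-- length of the raw binary digit list
theorem pvBinChars_length (m : Nat) : (pvBinChars m).length = pvBitLen m := by
  induction m using Nat.strong_induction_on with
  | _ m ih =>
    rw [pvBinChars, pvBitLen]
    by_cases h : m = 0
    · simp [h]
    · rw [if_neg h, if_neg h, List.length_append,
        ih (m / 2) (Nat.div_lt_self (Nat.pos_of_ne_zero h) (by norm_num))]
      simp

theorem pvBitLen_lt (m : Nat) : m < 2 ^ pvBitLen m := by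
  induction m using Nat.strong_induction_on with
  | _ m ih =>
    rw [pvBitLen]
    by_cases h : m = 0
    · simp [h]
    · rw [if_neg h]
      have := ih (m / 2) (Nat.div_lt_self (Nat.pos_of_ne_zero h) (by norm_num))
      rw [pow_succ]
      omega

theorem pvBinChars_getD (m : Nat) (hm : m ≠ 0) (j : Nat) (hj : j < pvBitLen m) :
    (pvBinChars m).getD j '0' = (if (m >>> (pvBitLen m - 1 - j)) % 2 = 1 then '1' else '0') := by
  induction m using Nat.strong_induction_on generalizing j with
  | _ m ih =>
    rw [pvBinChars, if_neg hm]
    have hbl : pvBitLen m = pvBitLen (m / 2) + 1 := by rw [pvBitLen, if_neg hm]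
    have hlen : (pvBinChars (m / 2)).length = pvBitLen (m / 2) := pvBinChars_length _
    rcases Nat.lt_or_ge j (pvBitLen (m / 2)) with hlt | hge
    · rw [List.getD_append _ _ _ _ (by omega)]
      have hm2 : m / 2 ≠ 0 := by
        intro h0; rw [h0] at hlt; simp [pvBitLen] at hlt
      rw [ih (m / 2) (Nat.div_lt_self (Nat.pos_of_ne_zero hm) (by norm_num)) hm2 j hlt]
      have hsh : (m / 2) >>> (pvBitLen (m / 2) - 1 - j) = m >>> (pvBitLen m - 1 - j) := by
        rw [Nat.shiftRight_eq_div_pow, Nat.shiftRight_eq_div_pow, Nat.div_div_eq_div_mul]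
        have he : pvBitLen m - 1 - j = (pvBitLen (m / 2) - 1 - j) + 1 := by omega
        rw [he, pow_succ]
        ring_nf
      rw [hsh]
    · have hjeq : j = pvBitLen (m / 2) := by omega
      have h2 : (pvBinChars (m / 2) ++ [if m % 2 = 1 then '1' else '0']).getD j '0'
          = (if m % 2 = 1 then '1' else '0') := by
        rw [List.getD_append_right _ _ _ _ (by omega)]
        rw [hlen, hjeq]
        simp [List.getD]
      rw [h2]
      have h0 : pvBitLen m - 1 - j = 0 := by omega
      rw [h0]
      simp

theorem pvBinary_length (n : Int) : (pvBinary n).length = max (pvBitLen n.toNat) 1 := by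
  rw [pvBinary]
  by_cases h : n.toNat = 0
  · simp [h, pvBitLen]
  · rw [if_neg h, pvBinChars_length]
    have : 1 ≤ pvBitLen n.toNat := by rw [pvBitLen, if_neg h]; omega
    omega

theorem padded_getD (m n j : Nat) (hn : pvBitLen m ≤ n) (h1 : 1 ≤ n) (hj : j < n) :
    (List.replicate (n - (pvBinary (m : Int)).length) '0' ++ pvBinary (m : Int)).getD j '0'
      = (if (m >>> (n - 1 - j)) % 2 = 1 then '1' else '0') := by
  have htn : (m : Int).toNat = m := Int.toNat_natCast m
  have hlen : (pvBinary (m : Int)).length = max (pvBitLen m) 1 := by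
    rw [pvBinary_length, htn]
  by_cases hm : m = 0
  · subst hm
    have hz : ∀ k, (0 : Nat) >>> k % 2 = 0 := by intro k; simp
    rw [hz]
    have hb0 : pvBinary ((0 : Nat) : Int) = ['0'] := by rw [pvBinary]; simp
    rw [hb0]
    simp only [List.length_cons, List.length_nil]
    rcases Nat.lt_or_ge j (n - 1) with h | h
    · rw [List.getD_append _ _ _ _ (by simp only [List.length_replicate]; omega)]
      rw [List.getD_replicate _ (by omega)]
      simp
    · have hjeq : j = n - 1 := by omega
      rw [hjeq, List.getD_append_right _ _ _ _ (by simp only [List.length_replicate]; omega)]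
      simp [List.getD]
  · have hbl1 : 1 ≤ pvBitLen m := by rw [pvBitLen, if_neg hm]; omega
    have hbin : pvBinary (m : Int) = pvBinChars m := by rw [pvBinary, htn, if_neg hm]
    rw [hbin, pvBinChars_length]
    rcases Nat.lt_or_ge j (n - pvBitLen m) with h | h
    · rw [List.getD_append _ _ _ _ (by simp only [List.length_replicate]; omega)]
      rw [List.getD_replicate _ (by omega)]
      have hz : m >>> (n - 1 - j) = 0 := by
        rw [Nat.shiftRight_eq_div_pow]
        apply Nat.div_eq_of_lt
        calc m < 2 ^ pvBitLen m := pvBitLen_lt m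
        _ ≤ 2 ^ (n - 1 - j) := Nat.pow_le_pow_right (by norm_num) (by omega)
      rw [hz]
      norm_num
    · rw [List.getD_append_right _ _ _ _ (by simp only [List.length_replicate]; omega)]
      simp only [List.length_replicate]
      have hj' : j - (n - pvBitLen m) < pvBitLen m := by omega
      rw [pvBinChars_getD m hm _ hj']
      have he : pvBitLen m - 1 - (j - (n - pvBitLen m)) = n - 1 - j := by omega
      rw [he]

-- pvCharInt of a bit character is the bit
theorem pvCharInt_bit (v : Nat) :
    pvCharInt (if v % 2 = 1 then '1' else '0') = ((v % 2 : Nat) : Int) := by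
  rcases Nat.mod_two_eq_zero_or_one v with h | h <;> simp [h, pvCharInt]

-- operationBit on bit values is the truth-table bit
theorem operationBit_eq (x y : Nat) (hx : x < 2) (hy : y < 2) (rule : Int) (hr : 0 ≤ rule) :
    operationBit (x : Int) (y : Int) rule = ((pvTb rule x y : Nat) : Int) := by
  rw [operationBit, pvTb]
  have hrn : ((rule.toNat : Nat) : Int) = rule := Int.toNat_of_nonneg hr
  have hlen : (pvBinary rule).length = max (pvBitLen rule.toNat) 1 := pvBinary_length rule
  have hidx : (2 * (x : Int) + y).toNat = 2 * x + y := by omega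
  have hif : (if (pvBinary rule).length < 4 then
        List.replicate (4 - (pvBinary rule).length) '0' ++ pvBinary rule else pvBinary rule)
      = List.replicate (max 4 (pvBitLen rule.toNat) - (pvBinary rule).length) '0' ++ pvBinary rule := by
    split_ifs with h
    · congr 2; omega
    · have h0 : max 4 (pvBitLen rule.toNat) - (pvBinary rule).length = 0 := by omega
      rw [h0]; simp
  have hpad := padded_getD rule.toNat (max 4 (pvBitLen rule.toNat)) (2 * x + y)
      (by omega) (by omega) (by omega)
  rw [hrn] at hpad
  simp only [hif, hidx, hpad, pvCharInt_bit]

-- (v >>> j) % 2 as a testBit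
theorem mod2_testBit (v j : Nat) : v >>> j % 2 = if v.testBit j then 1 else 0 := by
  rw [← Nat.and_one_is_mod]
  cases h : v.testBit j <;> simp [Nat.testBit, Nat.and_one_is_mod] at h ⊢ <;> omega

-- a foldl of additions over range is a Finset sum
theorem foldl_add_eq_sum (f : Nat → Int) (n : Nat) :
    (List.range n).foldl (fun out i => out + f i) 0 = ∑ i ∈ Finset.range n, f i := by
  induction n with
  | zero => simp
  | succ n ih => rw [List.range_succ, List.foldl_append, ih, Finset.sum_range_succ]; simp

-- the bit of a pvMaskStep
theorem testBit_maskStep (c v m j : Nat) :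
    (pvMaskStep c v m).testBit j = (v.testBit j || (decide (c ≠ 0) && m.testBit j)) := by
  rw [pvMaskStep]
  split_ifs with h <;> simp [Nat.testBit_or, h]

-- the reversal loop: after n steps r carries the first n bits of v, reversed
theorem rev_fold (n : Nat) : ∀ (r v : Nat),
    (List.range n).foldl (fun p _ => (p.1 * 2 + (p.2 &&& 1), p.2 >>> 1)) (r, v)
      = (r * 2 ^ n + ∑ j ∈ Finset.range n, 2 ^ (n - 1 - j) * (if v.testBit j then 1 else 0),
         v >>> n) := by
  induction n with
  | zero => intro r v; simp
  | succ n ih =>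
    intro r v
    rw [List.range_succ, List.foldl_append, ih]
    simp only [List.foldl_cons, List.foldl_nil, Prod.mk.injEq]
    refine ⟨?_, ?_⟩
    · rw [Nat.and_one_is_mod, mod2_testBit v n]
      have hsum : ∑ j ∈ Finset.range (n + 1), 2 ^ (n + 1 - 1 - j) * (if v.testBit j then 1 else 0)
          = (∑ j ∈ Finset.range n, 2 ^ (n - j) * (if v.testBit j then 1 else 0))
            + (if v.testBit n then 1 else 0) := by
        rw [Finset.sum_range_succ]
        have hlast : (2 : Nat) ^ (n + 1 - 1 - n) * (if v.testBit n then 1 else 0)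
            = (if v.testBit n then 1 else 0) := by simp
        rw [hlast]
        have hrest : ∀ j ∈ Finset.range n,
            (2 : Nat) ^ (n + 1 - 1 - j) * (if v.testBit j then 1 else 0)
              = 2 ^ (n - j) * (if v.testBit j then 1 else 0) := by
          intro j hjm
          norm_num
        rw [Finset.sum_congr rfl hrest]
      rw [hsum]
      have h2 : ∑ j ∈ Finset.range n, (2 : Nat) ^ (n - j) * (if v.testBit j then 1 else 0)
          = 2 * ∑ j ∈ Finset.range n, 2 ^ (n - 1 - j) * (if v.testBit j then 1 else 0) := by
        rw [Finset.mul_sum]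
        refine Finset.sum_congr rfl (fun j hjm => ?_)
        have hj' := Finset.mem_range.mp hjm
        rw [← mul_assoc, ← pow_succ']
        congr 2
        omega
      rw [h2]
      ring
    · rw [Nat.shiftRight_one, ← Nat.shiftRight_succ]

-- bit j (j < n) of the four-mask combination: the rule table entry selected by the operand bits
theorem chain_bit (x y n t3 t2 t1 t0 j : Nat) (hj : j < n)
    (h3 : t3 ≤ 1) (h2 : t2 ≤ 1) (h1 : t1 ≤ 1) (h0 : t0 ≤ 1) :
    (if (pvMaskStep t0 (pvMaskStep t1 (pvMaskStep t2 (pvMaskStep t3 0 (x &&& y))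
          (x &&& (y ^^^ (1 <<< n - 1)))) ((x ^^^ (1 <<< n - 1)) &&& y))
          ((x ^^^ (1 <<< n - 1)) &&& (y ^^^ (1 <<< n - 1)))).testBit j then (1 : Nat) else 0)
      = (if x.testBit j then (if y.testBit j then t3 else t2)
         else (if y.testBit j then t1 else t0)) := by
  have hfull : (1 <<< n - 1).testBit j = true := by
    rw [Nat.shiftLeft_eq, one_mul, Nat.testBit_two_pow_sub_one]
    simpa using hj
  simp only [testBit_maskStep, Nat.testBit_and, Nat.testBit_xor, hfull, Nat.zero_testBit,
    Bool.false_or]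
  cases hx : x.testBit j <;> cases hy : y.testBit j <;> simp <;> split_ifs <;> omega

-- ===== VERDICT (by name: the statement is the Claim_ definition above) =====
theorem operationNumber_spec : Claim_equal_operationNumber := by
  intro a b rule _ hpre
  obtain ⟨ha, hb, hr⟩ := hpre
  unfold Spec_operationNumber
  have hta : ((a.toNat : Nat) : Int) = a := Int.toNat_of_nonneg ha
  have htb : ((b.toNat : Nat) : Int) = b := Int.toNat_of_nonneg hb
  have hlena : (pvBinary a).length = max (pvBitLen a.toNat) 1 := pvBinary_length a
  have hlenb : (pvBinary b).length = max (pvBitLen b.toNat) 1 := pvBinary_length b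
  set n := max (max (pvBitLen a.toNat) (pvBitLen b.toNat)) 1 with hn
  -- ---- A equals the reflected truth-table sum ----
  have hA : operationNumber a b rule
      = ∑ i ∈ Finset.range n,
          (2 ^ i : Int) * ((pvTb rule (a.toNat >>> (n - 1 - i) % 2) (b.toNat >>> (n - 1 - i) % 2) : Nat) : Int) := by
    unfold operationNumber
    have hpa : (if (pvBinary a).length > (pvBinary b).length then pvBinary a
        else if (pvBinary a).length < (pvBinary b).length then
          List.replicate ((pvBinary b).length - (pvBinary a).length) '0' ++ pvBinary a
        else pvBinary a)
        = List.replicate (n - (pvBinary a).length) '0' ++ pvBinary a := by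
      split_ifs with h1 h2
      · have h0 : n - (pvBinary a).length = 0 := by omega
        rw [h0]; simp
      · congr 2; omega
      · have h0 : n - (pvBinary a).length = 0 := by omega
        rw [h0]; simp
    have hpb : (if (pvBinary a).length > (pvBinary b).length then
          List.replicate ((pvBinary a).length - (pvBinary b).length) '0' ++ pvBinary b
        else pvBinary b)
        = List.replicate (n - (pvBinary b).length) '0' ++ pvBinary b := by
      split_ifs with h1
      · congr 2; omega
      · have h0 : n - (pvBinary b).length = 0 := by omega
        rw [h0]; simp
    simp only [hpa, hpb]
    have hlenpa : (List.replicate (n - (pvBinary a).length) '0' ++ pvBinary a).length = n := by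
      simp only [List.length_append, List.length_replicate]; omega
    rw [hlenpa]
    refine Eq.trans (PySem.List.foldl_congr_mem _ _ _ _ ?_)
      (foldl_add_eq_sum (fun i => (2 ^ i : Int) *
        ((pvTb rule (a.toNat >>> (n - 1 - i) % 2) (b.toNat >>> (n - 1 - i) % 2) : Nat) : Int)) n)
    intro acc i hi
    have hi' : i < n := List.mem_range.mp hi
    have hca := padded_getD a.toNat n i (by omega) (by omega) hi'
    have hcb := padded_getD b.toNat n i (by omega) (by omega) hi'
    rw [hta] at hca
    rw [htb] at hcb
    rw [hca, hcb, pvCharInt_bit, pvCharInt_bit,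
      operationBit_eq _ _ (Nat.mod_lt _ (by norm_num)) (Nat.mod_lt _ (by norm_num)) rule hr]
  -- ---- B equals the direct truth-table sum ----
  have hB : operationNumber_alt a b rule
      = ((∑ j ∈ Finset.range n,
            2 ^ (n - 1 - j) * (pvTb rule (a.toNat >>> j % 2) (b.toNat >>> j % 2)) : Nat) : Int) := by
    unfold operationNumber_alt
    dsimp only
    rw [← hn]
    have hle : ∀ (x y : Nat), pvTb rule x y ≤ 1 := by
      intro x y; unfold pvTb; omega
    have ht3 : (((List.range 4).map (fun k =>
        rule.toNat >>> (max 4 (pvBitLen rule.toNat) - 1 - k) % 2)).getD 3 0) = pvTb rule 1 1 := by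
      norm_num [List.range_succ, pvTb]
    have ht2 : (((List.range 4).map (fun k =>
        rule.toNat >>> (max 4 (pvBitLen rule.toNat) - 1 - k) % 2)).getD 2 0) = pvTb rule 1 0 := by
      norm_num [List.range_succ, pvTb]
    have ht1 : (((List.range 4).map (fun k =>
        rule.toNat >>> (max 4 (pvBitLen rule.toNat) - 1 - k) % 2)).getD 1 0) = pvTb rule 0 1 := by
      norm_num [List.range_succ, pvTb]
    have ht0 : (((List.range 4).map (fun k =>
        rule.toNat >>> (max 4 (pvBitLen rule.toNat) - 1 - k) % 2)).getD 0 0) = pvTb rule 0 0 := by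
      norm_num [List.range_succ, pvTb]
    rw [ht3, ht2, ht1, ht0, rev_fold]
    simp only [zero_mul, zero_add]
    congr 1
    apply Finset.sum_congr rfl
    intro j hj
    have hj' : j < n := Finset.mem_range.mp hj
    congr 1
    rw [chain_bit a.toNat b.toNat n (pvTb rule 1 1) (pvTb rule 1 0) (pvTb rule 0 1)
      (pvTb rule 0 0) j hj' (hle _ _) (hle _ _) (hle _ _) (hle _ _)]
    rw [mod2_testBit, mod2_testBit]
    cases hx : a.toNat.testBit j <;> cases hy : b.toNat.testBit j <;> simp
  -- ---- combine via bit reversal of the sum ----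
  rw [hA, hB]
  push_cast
  rw [← Finset.sum_range_reflect (fun i =>
    (2 ^ i : Int) * ((pvTb rule (a.toNat >>> (n - 1 - i) % 2) (b.toNat >>> (n - 1 - i) % 2) : Nat) : Int)) n]
  apply Finset.sum_congr rfl
  intro j hj
  have hj' : j < n := Finset.mem_range.mp hj
  have he : n - 1 - (n - 1 - j) = j := by omega
  simp only [he]
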